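-- pv_equiv track=rewrite | github.com/margotrud/Shopping_assistant | src/Shopping_assistant/nlp/runtime/lexicon.py | _prefer_variant
-- ===== SOURCE A (Python) =====
-- from typing import Any, Dict, List, Optional
--
-- def _token_variants(t: str) -> List[str]:
--     """
--     Runtime-only morphological normalization.
--     """
--     t = t.strip().lower()
--     if not t:
--         return []
--     out = [t]
--
--     if len(t) >= 5 and t.endswith("ish"):
--         out.append(t[:-3])
--
--     if len(t) >= 4 and t.endswith("y"):
--         out.append(t[:-1])
--
--     # plural stripping: guarded (avoid glass->glas, dress->dres, etc.)
--     if len(t) >= 5 and t.endswith("s") and not t.endswith(("ss", "us", "is")):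
--         out.append(t[:-1])
--
--     seen = set()
--     uniq: List[str] = []
--     for x in out:
--         if x and x not in seen:
--             uniq.append(x)
--             seen.add(x)
--     return uniq
--
-- def _prefer_variant(token: str, index: Dict[str, Dict[str, Any]]) -> str:
--     """
--     Choose the best matching variant for a token, preferring exact/base forms.
--     """
--     t = token.strip().lower()
--     vars_ = _token_variants(t)
--
--     present = [v for v in vars_ if v in index]
--     if not present:
--         return vars_[0] if vars_ else t
--
--     # exact first, then shortest
--     present.sort(key=lambda v: (0 if v == t else 1, len(v)))
--     return present[0]
-- ===== SOURCE B (Python) =====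
-- from typing import Any, Dict, List, Optional
--
-- def _token_variants(t: str) -> List[str]:
--     # Branch chain: the strip conditions key off the last character ('h', 'y', 's'),
--     # so at most one applies; the stripped form is shorter and nonempty, so no
--     # dedup pass is needed.
--     t = t.strip().lower()
--     if not t:
--         return []
--     if len(t) >= 5 and t.endswith("ish"):
--         return [t, t[:-3]]
--     if len(t) >= 4 and t.endswith("y"):
--         return [t, t[:-1]]
--     if len(t) >= 5 and t.endswith("s") and not t.endswith(("ss", "us", "is")):
--         return [t, t[:-1]]
--     return [t]
--
-- def _prefer_variant(token: str, index: Dict[str, Any]) -> str: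
--     # Early-return chain: exact form wins if present; otherwise the single
--     # possible stripped variant; otherwise the base form (or t itself if empty).
--     t = token.strip().lower()
--     vars_ = _token_variants(t)
--     if not vars_:
--         return t
--     if t in index:
--         return t
--     for v in vars_[1:]:
--         if v in index:
--             return v
--     return vars_[0]
-- ===== Notes on version B (the rewrite author's own statement) =====
-- stated objective: simpler
-- what changed: Replaces A's pipeline (append up to three variant strings, dedup with a seen-set, filter by index membership, stable-sort by (exact, length), take first) with an early-return branch chain: the three strip rules are keyed to distinct last characters so at most one variant besides the base exists, making the dedup, filter and sort passes unnecessary.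
import Mathlib
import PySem

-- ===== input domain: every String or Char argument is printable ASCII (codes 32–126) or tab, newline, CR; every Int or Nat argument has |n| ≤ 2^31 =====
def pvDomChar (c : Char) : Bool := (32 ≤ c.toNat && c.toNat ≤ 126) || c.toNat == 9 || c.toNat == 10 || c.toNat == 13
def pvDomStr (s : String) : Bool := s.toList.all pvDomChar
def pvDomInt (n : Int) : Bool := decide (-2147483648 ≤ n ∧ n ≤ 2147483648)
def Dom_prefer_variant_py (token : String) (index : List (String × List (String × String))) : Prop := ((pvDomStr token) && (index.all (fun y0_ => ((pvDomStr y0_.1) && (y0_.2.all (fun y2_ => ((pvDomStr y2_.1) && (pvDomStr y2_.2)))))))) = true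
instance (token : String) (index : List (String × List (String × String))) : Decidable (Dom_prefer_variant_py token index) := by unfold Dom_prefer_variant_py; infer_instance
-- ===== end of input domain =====

-- B replaces A's append-variants/dedup/filter/sort pipeline by an early-return branch chain
-- (at most one morphological strip applies, so no dedup and no sort is needed); same results, simpler.
-- ===== PORT A =====

-- port of A's _token_variants
-- dedup loop: `for x in out: if x and x not in seen: uniq.append(x); seen.add(x)`
def pvDedupLoop : List (List Char) → List (List Char) × PySem.Set (List Char) → List (List Char) × PySem.Set (List Char)
  | [], p => p
  | x :: rest, p =>
      pvDedupLoop rest (if x ≠ [] ∧ x ∉ p.2 then (p.1 ++ [x], PySem.Set.add p.2 x) else p)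

def tokenVariants (t0 : List Char) : List (List Char) :=
  let t := PySem.Chars.lower (PySem.Chars.strip t0)
  if t = [] then []
  else
    let out := [t]
    let out := if 5 ≤ PySem.Chars.len t ∧ PySem.Chars.endswith t "ish".toList then
        out ++ [PySem.List.slice t none (some (-3))] else out
    let out := if 4 ≤ PySem.Chars.len t ∧ PySem.Chars.endswith t "y".toList then
        out ++ [PySem.List.slice t none (some (-1))] else out
    let out := if 5 ≤ PySem.Chars.len t ∧ PySem.Chars.endswith t "s".toList ∧
        ¬ (PySem.Chars.endswith t "ss".toList ∨ PySem.Chars.endswith t "us".toList ∨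
           PySem.Chars.endswith t "is".toList) then
        out ++ [PySem.List.slice t none (some (-1))] else out
    (pvDedupLoop out ([], PySem.Set.ofList [])).1

-- `v in index` (dict key membership)
def memIndex (index : List (String × List (String × String))) (v : List Char) : Bool :=
  index.any (fun kv => kv.1.toList == v)

def prefer_variant_py (token : String) (index : List (String × List (String × String))) : String :=
  let t := PySem.Chars.lower (PySem.Chars.strip token.toList)
  let vars_ := tokenVariants t
  let present := vars_.filter (fun v => memIndex index v)
  if present = [] then
    match vars_ with
    | v0 :: _ => String.ofList v0
    | [] => String.ofList t
  else
    -- present.sort(key=lambda v: (0 if v == t else 1, len(v))); return present[0]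
    match PySem.List.sorted2 present (fun v => if v == t then (0 : Nat) else 1) (fun v => v.length) with
    | p :: _ => String.ofList p
    | [] => String.ofList t   -- unreachable: present ≠ []

-- ===== PORT B =====

-- port of B's _token_variants: an early-return branch chain, no dedup pass
def tokenVariantsB (t0 : List Char) : List (List Char) :=
  let t := PySem.Chars.lower (PySem.Chars.strip t0)
  if t = [] then []
  else if 5 ≤ PySem.Chars.len t ∧ PySem.Chars.endswith t "ish".toList then
    [t, PySem.List.slice t none (some (-3))]
  else if 4 ≤ PySem.Chars.len t ∧ PySem.Chars.endswith t "y".toList then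
    [t, PySem.List.slice t none (some (-1))]
  else if 5 ≤ PySem.Chars.len t ∧ PySem.Chars.endswith t "s".toList ∧
      ¬ (PySem.Chars.endswith t "ss".toList ∨ PySem.Chars.endswith t "us".toList ∨
         PySem.Chars.endswith t "is".toList) then
    [t, PySem.List.slice t none (some (-1))]
  else [t]

-- `v in index` (dict key membership), B's copy
def memIndexB (index : List (String × List (String × String))) (v : List Char) : Bool :=
  index.any (fun kv => kv.1.toList == v)

-- `for v in vars_[1:]: if v in index: return v`
def firstPresent (index : List (String × List (String × String))) : List (List Char) → Option (List Char)
  | [] => none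
  | v :: rest => if memIndexB index v then some v else firstPresent index rest

def prefer_variant_py_alt (token : String) (index : List (String × List (String × String))) : String :=
  let t := PySem.Chars.lower (PySem.Chars.strip token.toList)
  match tokenVariantsB t with
  | [] => String.ofList t
  | v0 :: rest =>
      if memIndexB index t then String.ofList t
      else
        match firstPresent index rest with
        | some v => String.ofList v
        | none => String.ofList v0

-- ===== PRECONDITION & SPEC =====
def Spec_prefer_variant_py (token : String) (index : List (String × List (String × String))) (out : String) : Prop := out = prefer_variant_py_alt token index
instance (token : String) (index : List (String × List (String × String))) (out : String) : Decidable (Spec_prefer_variant_py token index out) := by unfold Spec_prefer_variant_py; infer_instance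

-- ===== CLAIM (what is proved, stated in full; the proofs are below) =====
def Claim_equal_prefer_variant_py : Prop := ∀ (token : String) (index : List (String × List (String × String))), Dom_prefer_variant_py token index → Spec_prefer_variant_py token index (prefer_variant_py token index)

-- ===== LEMMAS AND PROOFS =====

theorem upper_bounds {c : Char} (h : PySem.Chars.isupper c = true) :
    65 ≤ c.toNat ∧ c.toNat ≤ 90 := by
  unfold PySem.Chars.isupper at h
  simp only [Bool.and_eq_true, decide_eq_true_eq, Char.le_def, UInt32.le_iff_toNat_le] at h
  exact h

theorem toNat_lower_of_upper {c : Char} (h : PySem.Chars.isupper c = true) :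
    (Char.ofNat (c.toNat + 32)).toNat = c.toNat + 32 := by
  obtain ⟨h1, h2⟩ := upper_bounds h
  rw [Char.toNat_ofNat, if_pos]
  left; omega

theorem isspace_lowerChar (c : Char) :
    PySem.Chars.isspace (PySem.Chars.lowerChar c) = PySem.Chars.isspace c := by
  unfold PySem.Chars.lowerChar
  split
  · next h =>
    obtain ⟨h1, h2⟩ := upper_bounds h
    unfold PySem.Chars.isspace
    simp only [toNat_lower_of_upper h]
    rw [Bool.eq_iff_iff]
    simp only [Bool.or_eq_true, Bool.and_eq_true, decide_eq_true_eq]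
    omega
  · rfl

theorem lowerChar_idem (c : Char) :
    PySem.Chars.lowerChar (PySem.Chars.lowerChar c) = PySem.Chars.lowerChar c := by
  unfold PySem.Chars.lowerChar
  split
  · next h =>
    obtain ⟨h1, h2⟩ := upper_bounds h
    rw [if_neg]
    unfold PySem.Chars.isupper
    simp only [Bool.and_eq_true, decide_eq_true_eq, Char.le_def, UInt32.le_iff_toNat_le, not_and]
    intro
    show ¬ (Char.ofNat (c.toNat + 32)).toNat ≤ 90
    rw [toNat_lower_of_upper h]; omega
  · rfl

theorem lower_idem (s : List Char) :
    PySem.Chars.lower (PySem.Chars.lower s) = PySem.Chars.lower s := by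
  unfold PySem.Chars.lower
  rw [List.map_map]
  exact List.map_congr_left (fun c _ => lowerChar_idem c)

theorem lstrip_lower (s : List Char) :
    PySem.Chars.lstrip (PySem.Chars.lower s) = PySem.Chars.lower (PySem.Chars.lstrip s) := by
  unfold PySem.Chars.lstrip PySem.Chars.lower
  rw [List.dropWhile_map, show (PySem.Chars.isspace ∘ PySem.Chars.lowerChar) = PySem.Chars.isspace from funext isspace_lowerChar]

theorem rstrip_lower (s : List Char) :
    PySem.Chars.rstrip (PySem.Chars.lower s) = PySem.Chars.lower (PySem.Chars.rstrip s) := by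
  unfold PySem.Chars.rstrip PySem.Chars.lower
  rw [← List.map_reverse, List.dropWhile_map, List.map_reverse,
    show (PySem.Chars.isspace ∘ PySem.Chars.lowerChar) = PySem.Chars.isspace from funext isspace_lowerChar]

theorem strip_lower (s : List Char) :
    PySem.Chars.strip (PySem.Chars.lower s) = PySem.Chars.lower (PySem.Chars.strip s) := by
  unfold PySem.Chars.strip
  rw [lstrip_lower, rstrip_lower]

theorem dropWhile_idem {α : Type} (p : α → Bool) (l : List α) :
    List.dropWhile p (List.dropWhile p l) = List.dropWhile p l := by
  rw [List.dropWhile_eq_self_iff]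
  intro h
  have hne : List.dropWhile p l ≠ [] := List.length_pos_iff.mp h
  have := List.head_dropWhile_not p hne
  simpa [List.head_eq_getElem] using this

theorem lstrip_rstrip_lstrip (s : List Char) :
    PySem.Chars.lstrip (PySem.Chars.rstrip (PySem.Chars.lstrip s)) =
      PySem.Chars.rstrip (PySem.Chars.lstrip s) := by
  unfold PySem.Chars.lstrip PySem.Chars.rstrip
  set p := PySem.Chars.isspace with hp
  set x := List.dropWhile p s with hx
  have hxx : List.dropWhile p x = x := dropWhile_idem p s
  have hpre : (List.dropWhile p x.reverse).reverse <+: x := by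
    rw [← List.reverse_reverse x]
    exact List.reverse_prefix.mpr (by simpa using List.dropWhile_suffix (l := x.reverse) p)
  rw [List.dropWhile_eq_self_iff]
  intro hlen
  have hxlen : 0 < x.length := lt_of_lt_of_le hlen hpre.length_le
  rw [hpre.getElem hlen]
  exact List.dropWhile_eq_self_iff.mp hxx hxlen

theorem strip_idem (s : List Char) :
    PySem.Chars.strip (PySem.Chars.strip s) = PySem.Chars.strip s := by
  unfold PySem.Chars.strip
  rw [lstrip_rstrip_lstrip]
  unfold PySem.Chars.rstrip
  rw [List.reverse_reverse, dropWhile_idem]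

-- the normalization t.strip().lower() is idempotent
theorem norm_idem (s : List Char) :
    PySem.Chars.lower (PySem.Chars.strip (PySem.Chars.lower (PySem.Chars.strip s))) =
      PySem.Chars.lower (PySem.Chars.strip s) := by
  rw [strip_lower, strip_idem, lower_idem]

-- last-character facts from endswith
theorem endswith_single_last {t : List Char} {c : Char}
    (h : PySem.Chars.endswith t [c] = true) : t.getLast? = some c := by
  obtain ⟨r, hr⟩ := (PySem.Chars.endswith_iff t [c]).mp h
  subst hr
  simp

-- at most one of A's three strip branches fires, and the stripped form is a new nonempty string
theorem len_ge {t : List Char} {k : Int} (h : k ≤ PySem.Chars.len t) :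
    k ≤ (t.length : Int) := by
  unfold PySem.Chars.len at h; exact h

theorem slice3_facts {t : List Char} (h5 : 5 ≤ t.length) :
    PySem.List.slice t none (some (-3)) ≠ t ∧ PySem.List.slice t none (some (-3)) ≠ [] := by
  rw [PySem.List.slice_to_neg_ofNat t 3 (by omega)]
  constructor
  · intro he; have := congrArg List.length he; simp [List.length_take] at this; omega
  · intro he; have := congrArg List.length he; simp [List.length_take] at this; omega

theorem slice1_facts {t : List Char} (h2 : 2 ≤ t.length) :
    PySem.List.slice t none (some (-1)) ≠ t ∧ PySem.List.slice t none (some (-1)) ≠ [] := by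
  rw [PySem.List.slice_to_neg_one]
  constructor
  · intro he; have := congrArg List.length he; simp [List.length_dropLast] at this; omega
  · intro he; have := congrArg List.length he; simp [List.length_dropLast] at this; omega

theorem dedup_one {t : List Char} (h : t ≠ []) :
    (pvDedupLoop [t] ([], PySem.Set.ofList [])).1 = [t] := by
  simp [pvDedupLoop, h]

theorem dedup_two {t u : List Char} (ht : t ≠ []) (hu : u ≠ []) (hut : u ≠ t) :
    (pvDedupLoop [t, u] ([], PySem.Set.ofList [])).1 = [t, u] := by
  simp [pvDedupLoop, ht, hu, hut]

theorem variants_eq (t0 : List Char) : tokenVariants t0 = tokenVariantsB t0 := by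
  unfold tokenVariants tokenVariantsB
  set t := PySem.Chars.lower (PySem.Chars.strip t0) with ht
  by_cases h0 : t = []
  · simp [h0]
  · simp only [if_neg h0]
    have hish : PySem.Chars.endswith t "ish".toList = true → t.getLast? = some 'h' := fun h => by
      apply endswith_single_last
      exact (PySem.Chars.endswith_iff t ['h']).mpr
        (List.IsSuffix.trans (by decide) ((PySem.Chars.endswith_iff t "ish".toList).mp h))
    have hyl : PySem.Chars.endswith t "y".toList = true → t.getLast? = some 'y' :=
      fun h => endswith_single_last h
    have hsl : PySem.Chars.endswith t "s".toList = true → t.getLast? = some 's' :=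
      fun h => endswith_single_last h
    by_cases hc1 : 5 ≤ PySem.Chars.len t ∧ PySem.Chars.endswith t "ish".toList = true
    · have hc2 : ¬ (4 ≤ PySem.Chars.len t ∧ PySem.Chars.endswith t "y".toList = true) :=
        fun h => by simpa using (hish hc1.2).symm.trans (hyl h.2)
      have hc3 : ¬ (5 ≤ PySem.Chars.len t ∧ PySem.Chars.endswith t "s".toList = true ∧
          ¬ (PySem.Chars.endswith t "ss".toList = true ∨ PySem.Chars.endswith t "us".toList = true ∨
             PySem.Chars.endswith t "is".toList = true)) :=
        fun h => by simpa using (hish hc1.2).symm.trans (hsl h.2.1)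
      simp only [eq_true_intro hc1, eq_false hc2, eq_false hc3, if_false,
        List.singleton_append]
      exact dedup_two h0 (slice3_facts (t := t) (by have := len_ge hc1.1; omega)).2
        (slice3_facts (t := t) (by have := len_ge hc1.1; omega)).1
    · by_cases hc2 : 4 ≤ PySem.Chars.len t ∧ PySem.Chars.endswith t "y".toList = true
      · have hc3 : ¬ (5 ≤ PySem.Chars.len t ∧ PySem.Chars.endswith t "s".toList = true ∧
            ¬ (PySem.Chars.endswith t "ss".toList = true ∨ PySem.Chars.endswith t "us".toList = true ∨
               PySem.Chars.endswith t "is".toList = true)) :=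
          fun h => by simpa using (hyl hc2.2).symm.trans (hsl h.2.1)
        simp only [eq_false hc1, eq_true_intro hc2, eq_false hc3, if_true, if_false,
          List.singleton_append]
        exact dedup_two h0 (slice1_facts (t := t) (by have := len_ge hc2.1; omega)).2
          (slice1_facts (t := t) (by have := len_ge hc2.1; omega)).1
      · by_cases hc3 : 5 ≤ PySem.Chars.len t ∧ PySem.Chars.endswith t "s".toList = true ∧
            ¬ (PySem.Chars.endswith t "ss".toList = true ∨ PySem.Chars.endswith t "us".toList = true ∨
               PySem.Chars.endswith t "is".toList = true)
        · simp only [eq_false hc1, eq_false hc2, eq_true_intro hc3, if_true, if_false,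
            List.singleton_append]
          exact dedup_two h0 (slice1_facts (t := t) (by have := len_ge hc3.1; omega)).2
            (slice1_facts (t := t) (by have := len_ge hc3.1; omega)).1
        · simp only [eq_false hc1, eq_false hc2, eq_false hc3, if_false]
          exact dedup_one h0

-- shape of the variant list of an already-normalized nonempty token
theorem variantsB_shape (t : List Char) (h : PySem.Chars.lower (PySem.Chars.strip t) = t)
    (hne : t ≠ []) :
    tokenVariantsB t = [t] ∨ ∃ u, u ≠ t ∧ tokenVariantsB t = [t, u] := by
  unfold tokenVariantsB
  rw [h]
  rw [if_neg hne]
  split_ifs with h1 h2 h3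
  · exact Or.inr ⟨_, (slice3_facts (t := t) (by have := len_ge h1.1; omega)).1, rfl⟩
  · exact Or.inr ⟨_, (slice1_facts (t := t) (by have := len_ge h2.1; omega)).1, rfl⟩
  · exact Or.inr ⟨_, (slice1_facts (t := t) (by have := len_ge h3.1; omega)).1, rfl⟩
  · exact Or.inl rfl

theorem memIndexB_eq : memIndexB = memIndex := rfl

theorem variantsB_nil : tokenVariantsB [] = [] := rfl

-- ===== VERDICT (by name: the statement is the Claim_ definition above) =====
theorem prefer_variant_py_spec : Claim_equal_prefer_variant_py := by
  intro token index _
  show prefer_variant_py token index = prefer_variant_py_alt token index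
  simp only [prefer_variant_py, prefer_variant_py_alt, variants_eq, memIndexB_eq]
  set t := PySem.Chars.lower (PySem.Chars.strip token.toList) with ht
  have hid := norm_idem token.toList
  rw [← ht] at hid
  by_cases h0 : t = []
  · rw [h0, variantsB_nil]
    simp
  · rcases variantsB_shape t hid h0 with hv | ⟨u, hut, hv⟩
    · rw [hv]
      by_cases hmt : memIndex index t
      · simp [hmt, PySem.List.sorted2, PySem.List.insertBy]
      · simp [hmt, firstPresent]
    · rw [hv]
      have hut' : (u == t) = false := by simp [hut]
      by_cases hmt : memIndex index t
      · by_cases hmu : memIndex index u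
        · simp [hmt, hmu, PySem.List.sorted2, PySem.List.insertBy]
          rw [if_neg (fun h => hut h.1)]
        · simp [hmt, hmu, PySem.List.sorted2, PySem.List.insertBy]
      · by_cases hmu : memIndex index u
        · simp [hmt, hmu, PySem.List.sorted2, PySem.List.insertBy, firstPresent, memIndexB_eq]
        · simp [hmt, hmu, firstPresent, memIndexB_eq]
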